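-- pv_equiv track=rewrite | github.com/bigchan22/Ptab | src/data/Data_gen_utils.py | generate_UIO
-- ===== SOURCE A (Python) =====
-- def generate_UIO(n, connected=False):
--     ## Generate Dyck paths (in our notation, we denote it by P)
--     if connected == False:
--         mode = 1
--     else:
--         mode = 2
--     seq = [i + mode for i in range(n)]
--     seq[n - 1] = n
--     list_UIO = [list(seq)]
--     while seq[0] < n:
--         for i in range(n - 1):
--             if seq[i] < seq[i + 1]:
--                 seq[i] += 1
--                 for j in range(i):
--                     seq[j] = j + mode
--                 break
--         list_UIO += [list(seq)]
--     return list_UIO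
-- ===== SOURCE B (Python) =====
-- def generate_UIO(n, connected=False):
--     # Recursive enumeration: seqs(i) yields every valid area sequence for
--     # positions i..n-1; position i takes each value in i+mode .. s[0],
--     # with lower positions varying fastest.
--     mode = 2 if connected else 1
--
--     def seqs(i):
--         if i == n - 1:
--             return [[n]]
--         return [[v] + s for s in seqs(i + 1) for v in range(i + mode, s[0] + 1)]
--
--     return seqs(0)
-- ===== Notes on version B (the rewrite author's own statement) =====
-- stated objective: alternative
-- what changed: A's in-place odometer (scan for the first incrementable position, bump it, reset the lower ones) is replaced by a recursive enumeration: seqs(i) builds all valid area sequences for positions i..n-1, prepending every value in range(i+mode, s[0]+1) with lower positions varying fastest, which yields exactly A's emission order; Pre_ excludes n <= 0, where A raises IndexError (and B's recursion has no base case either).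
import Mathlib
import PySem

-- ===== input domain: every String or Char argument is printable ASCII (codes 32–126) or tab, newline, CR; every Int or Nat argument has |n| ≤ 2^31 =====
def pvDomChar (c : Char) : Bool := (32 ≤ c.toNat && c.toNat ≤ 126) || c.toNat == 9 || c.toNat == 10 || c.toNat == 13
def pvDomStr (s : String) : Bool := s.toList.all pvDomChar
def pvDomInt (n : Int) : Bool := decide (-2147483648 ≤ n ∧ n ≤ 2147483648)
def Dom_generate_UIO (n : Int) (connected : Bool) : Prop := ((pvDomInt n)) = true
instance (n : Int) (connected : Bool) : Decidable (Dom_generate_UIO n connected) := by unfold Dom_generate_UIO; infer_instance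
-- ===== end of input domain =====

-- B replaces A's in-place odometer by building the enumeration level by level
-- (a product construction over the positions); same output list, same order.

-- ===== PORT A =====

-- `seq[n-1] = n`: with len(seq) = n ≥ 1 this is the last slot; n ≤ 0 raises in Python (excluded by Pre_)
def setLastA (xs : List Int) (v : Int) : List Int :=
  match xs with
  | [] => []
  | [_] => [v]
  | x :: y :: rest => x :: setLastA (y :: rest) v

-- the inner `for i in range(n-1): if seq[i] < seq[i+1]: seq[i] += 1; reset j < i; break`
-- as structural recursion over seq (b = absolute index of the head, used for the reset value j + mode);
-- `none` = no break happened (then Python's while-loop never terminates; unreachable, see proofs)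
def bumpA (m : Int) (b : Int) : List Int → Option (List Int)
  | [] => none
  | [_] => none
  | x :: y :: rest =>
    if x < y then some ((x + 1) :: y :: rest)
    else match bumpA m (b + 1) (y :: rest) with
         | some r => some ((b + m) :: r)
         | none => none

-- the while-loop; fuel only makes the recursion total (shown sufficient in the proofs below)
def loopA (m n : Int) (fuel : Nat) (seq : List Int) (acc : List (List Int)) : List (List Int) :=
  match fuel with
  | 0 => acc
  | fuel + 1 =>
    if seq.headD 0 < n then   -- `while seq[0] < n` (seq nonempty under Pre_)
      match bumpA m 0 seq with
      | some seq' => loopA m n fuel seq' (acc ++ [seq'])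
      | none => acc           -- unreachable from A's initial state (Python loops forever here)
    else acc

def generate_UIO (n : Int) (connected : Bool) : List (List Int) :=
  let mode : Int := if connected = false then 1 else 2
  let seq := setLastA ((PySem.List.pyRange 0 n 1).map (fun i => i + mode)) n
  loopA mode n ((n.toNat + 1) ^ (n.toNat + 1)) seq [seq]

-- ===== PORT B =====

-- seqs(i) of Source B; the recursion descends on the gap n-1-i (carried as the Nat
-- argument, i = n-1-gap), which only makes the recursion structural: each step
-- is Source B's `[[v] + s for s in seqs(i + 1) for v in range(i + mode, s[0] + 1)]`.
-- For n ≤ 0 the Python recursion never reaches its base case (RecursionError; excluded by Pre_).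
def bSeqs (m n : Int) : Nat → Int → List (List Int)
  | 0, _ => [[n]]                    -- i == n - 1
  | gap+1, i => (bSeqs m n gap (i+1)).flatMap
      (fun s => (PySem.List.pyRange (i + m) (s.headD 0 + 1) 1).map (fun v => v :: s))

def generate_UIO_alt (n : Int) (connected : Bool) : List (List Int) :=
  let mode : Int := if connected then 2 else 1
  bSeqs mode n (n - 1).toNat 0

-- ===== PRECONDITION & SPEC =====
-- Pre_ excludes exactly n ≤ 0, where A raises IndexError (seq[n-1] on an empty list).
def Pre_generate_UIO (n : Int) (connected : Bool) : Prop := 1 ≤ n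
instance (n : Int) (connected : Bool) : Decidable (Pre_generate_UIO n connected) := by unfold Pre_generate_UIO; infer_instance
def pvWitness_generate_UIO : Int × Bool := (3, false)

def Spec_generate_UIO (n : Int) (connected : Bool) (out : List (List Int)) : Prop := out = generate_UIO_alt n connected
instance (n : Int) (connected : Bool) (out : List (List Int)) : Decidable (Spec_generate_UIO n connected out) := by unfold Spec_generate_UIO; infer_instance

-- ===== CLAIM (what is proved, stated in full; the proofs are below) =====
def Claim_equal_generate_UIO : Prop := ∀ (n : Int) (connected : Bool), Dom_generate_UIO n connected → Pre_generate_UIO n connected → Spec_generate_UIO n connected (generate_UIO n connected)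

-- ===== LEMMAS AND PROOFS =====

-- The nested enumeration: extE m n k b = all sequences with k free positions (minima
-- b+m, b+1+m, …, b+k-1+m) in front of the fixed tail [n]; smaller positions vary fastest.
def extE (m n : Int) : Nat → Int → List (List Int)
  | 0, _ => [[n]]
  | k+1, b => (extE m n k (b+1)).flatMap
      (fun t => (PySem.List.pyRange (b + m) (t.headD 0 + 1) 1).map (fun v => v :: t))

-- the minimal configuration (A's initial seq)
def minSeq (m n : Int) : Nat → Int → List Int
  | 0, _ => [n]
  | k+1, b => (b + m) :: minSeq m n k (b+1)

-- shape of the members of extE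
def ValidE (m n : Int) : Nat → Int → List Int → Prop
  | 0, _, e => e = [n]
  | k+1, b, e => ∃ v t, e = v :: t ∧ b + m ≤ v ∧ v ≤ t.headD 0 ∧ ValidE m n k (b+1) t

theorem mem_extE_valid (m n : Int) (k : Nat) : ∀ (b : Int) (e : List Int),
    e ∈ extE m n k b → ValidE m n k b e := by
  induction k with
  | zero => intro b e he; simpa [extE, ValidE] using he
  | succ k ih =>
    intro b e he
    simp only [extE, List.mem_flatMap, List.mem_map] at he
    obtain ⟨t, ht, v, hv, rfl⟩ := he
    rw [PySem.List.mem_pyRange_one] at hv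
    exact ⟨v, t, rfl, hv.1, by omega, ih _ _ ht⟩

theorem valid_ne_nil (m n : Int) (k : Nat) : ∀ (b : Int) (e : List Int),
    ValidE m n k b e → e ≠ [] := by
  cases k with
  | zero => intro b e he; simp only [ValidE] at he; simp [he]
  | succ k => intro b e he; obtain ⟨v, t, rfl, -⟩ := he; simp

theorem valid_head_le (m n : Int) (k : Nat) : ∀ (b : Int) (e : List Int),
    ValidE m n k b e → e.headD 0 ≤ n := by
  induction k with
  | zero => intro b e he; simp only [ValidE] at he; simp [he]
  | succ k ih =>
    intro b e he
    obtain ⟨v, t, rfl, h1, h2, ht⟩ := he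
    have := ih (b+1) t ht
    simp only [List.headD_cons]
    omega

theorem valid_head_ge (m n : Int) (k : Nat) : ∀ (b : Int) (e : List Int),
    b + k + m ≤ n + 1 → ValidE m n k b e → b + m - 1 ≤ e.headD 0 := by
  cases k with
  | zero =>
    intro b e hb he; simp only [ValidE] at he; subst he
    simp only [List.headD_cons]
    push_cast at hb; omega
  | succ k =>
    intro b e hb he
    obtain ⟨v, t, rfl, h1, h2, ht⟩ := he
    simp only [List.headD_cons]; omega

-- bumpA on a valid sequence fails exactly at the all-n (maximal) configuration
theorem valid_bump_none_iff (m n : Int) (k : Nat) : ∀ (b : Int) (e : List Int),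
    ValidE m n k b e → (bumpA m b e = none ↔ e.headD 0 = n) := by
  induction k with
  | zero => intro b e he; simp only [ValidE] at he; subst he; simp [bumpA]
  | succ k ih =>
    intro b e he
    obtain ⟨v, t, rfl, h1, h2, ht⟩ := he
    have hne := valid_ne_nil m n k (b+1) t ht
    have hle := valid_head_le m n k (b+1) t ht
    have iht := ih (b+1) t ht
    obtain ⟨y, rest, rfl⟩ : ∃ y rest, t = y :: rest := by
      cases t with | nil => exact absurd rfl hne | cons y r => exact ⟨y, r, rfl⟩
    simp only [List.headD_cons] at h2 hle iht ⊢
    constructor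
    · intro h
      simp only [bumpA] at h
      by_cases hlt : v < y
      · rw [if_pos hlt] at h; cases h
      · rw [if_neg hlt] at h
        cases hb : bumpA m (b+1) (y :: rest) with
        | some r => rw [hb] at h; cases h
        | none => have : y = n := iht.mp hb; omega
    · intro hv
      have hy : y = n := by omega
      have hnone : bumpA m (b+1) (y :: rest) = none := iht.mpr hy
      simp only [bumpA, hnone]
      rw [if_neg (by omega)]

-- head of the enumeration is the minimal configuration
theorem extE_head (m n : Int) (k : Nat) : ∀ (b : Int),
    b + k + m ≤ n + 1 → ∃ L, extE m n k b = minSeq m n k b :: L := by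
  induction k with
  | zero => intro b _; exact ⟨[], rfl⟩
  | succ k ih =>
    intro b hb
    obtain ⟨L, hL⟩ := ih (b+1) (by push_cast at hb ⊢; omega)
    have hv : ValidE m n k (b+1) (minSeq m n k (b+1)) := by
      apply mem_extE_valid; rw [hL]; exact List.mem_cons_self
    have hge := valid_head_ge m n k (b+1) (minSeq m n k (b+1)) (by push_cast at hb ⊢; omega) hv
    simp only [extE, hL, List.flatMap_cons]
    rw [PySem.List.pyRange_one_cons (by omega), List.map_cons]
    exact ⟨_, rfl⟩

-- the last element of the enumeration is the all-n configuration (head n)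
theorem extE_last (m n : Int) (k : Nat) : ∀ (b : Int),
    b + k + m ≤ n + 1 → ∃ l' e, extE m n k b = l' ++ [e] ∧ e.headD 0 = n := by
  induction k with
  | zero => intro b _; exact ⟨[], [n], rfl, rfl⟩
  | succ k ih =>
    intro b hb
    obtain ⟨l', t, hsplit, hhead⟩ := ih (b+1) (by push_cast at hb ⊢; omega)
    have hv : ValidE m n k (b+1) t := by
      apply mem_extE_valid; rw [hsplit]; simp
    have hge := valid_head_ge m n k (b+1) t (by push_cast at hb ⊢; omega) hv
    refine ⟨l'.flatMap (fun u => (PySem.List.pyRange (b + m) (u.headD 0 + 1) 1).map (fun v => v :: u))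
        ++ (PySem.List.pyRange (b + m) (t.headD 0) 1).map (fun v => v :: t),
      (t.headD 0) :: t, ?_, by simpa using hhead⟩
    simp only [extE, hsplit, List.flatMap_append, List.flatMap_cons, List.flatMap_nil,
      List.append_nil]
    rw [PySem.List.pyRange_one_succ_right (by omega), List.map_append, List.map_cons,
      List.map_nil, ← List.append_assoc]

-- successor chain over pyRange with the upper bound carried along
theorem chain_pyRange_aux : ∀ (len : Nat) (a c : Int), a + len = c →
    List.IsChain (fun x z => z = x + 1 ∧ z < c) (PySem.List.pyRange a c 1) := by
  intro len
  induction len with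
  | zero => intro a c h; rw [PySem.List.pyRange_one_eq_nil (by omega)]; exact List.isChain_nil
  | succ len ih =>
    intro a c h
    rw [PySem.List.pyRange_one_cons (by omega)]
    rw [List.isChain_cons]
    refine ⟨?_, ih (a+1) c (by push_cast at h ⊢; omega)⟩
    intro z hz
    cases hlen : len with
    | zero =>
      subst hlen
      rw [PySem.List.pyRange_one_eq_nil (by push_cast at h ⊢; omega)] at hz
      simp at hz
    | succ l =>
      subst hlen
      rw [PySem.List.pyRange_one_cons (by push_cast at h ⊢; omega)] at hz
      simp only [List.head?_cons, Option.mem_def, Option.some.injEq] at hz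
      subst hz
      exact ⟨rfl, by push_cast at h ⊢; omega⟩

theorem chain_pyRange (a c : Int) :
    List.IsChain (fun x z => z = x + 1 ∧ z < c) (PySem.List.pyRange a c 1) := by
  by_cases h : a ≤ c
  · exact chain_pyRange_aux (c - a).toNat a c (by omega)
  · rw [PySem.List.pyRange_one_eq_nil (by omega)]; exact List.isChain_nil

-- generic: chain a flatMap together from chained blocks
theorem isChain_flatMap_blocks {α β : Type} (R : β → β → Prop) (S : α → α → Prop) (f : α → List β) :
    ∀ (l : List α), List.IsChain S l →
      (∀ t ∈ l, f t ≠ []) →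
      (∀ t ∈ l, List.IsChain R (f t)) →
      (∀ t ∈ l, ∀ t' ∈ l, S t t' →
        ∀ x ∈ (f t).getLast?, ∀ y ∈ (f t').head?, R x y) →
      List.IsChain R (l.flatMap f) := by
  intro l
  induction l with
  | nil => intro _ _ _ _; simp
  | cons t rest ih =>
    intro hS hne hblocks hbd
    cases rest with
    | nil => simpa using hblocks t (by simp)
    | cons t' rest' =>
      rw [List.flatMap_cons, List.isChain_append]
      refine ⟨hblocks t (by simp), ?_, ?_⟩
      · exact ih (List.isChain_cons_cons.mp hS).2
          (fun u hu => hne u (List.mem_cons_of_mem _ hu))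
          (fun u hu => hblocks u (List.mem_cons_of_mem _ hu))
          (fun u hu u' hu' hS' => hbd u (List.mem_cons_of_mem _ hu) u' (List.mem_cons_of_mem _ hu') hS')
      · intro x hx y hy
        have hStt' : S t t' := (List.isChain_cons_cons.mp hS).1
        have hft' : f t' ≠ [] := hne t' (by simp)
        rw [List.flatMap_cons, List.head?_append] at hy
        rw [Option.mem_def, Option.or_eq_some_iff] at hy
        have hy' : y ∈ (f t').head? := by
          rcases hy with h | ⟨h, _⟩
          · exact h
          · exact absurd (List.head?_eq_none_iff.mp h) hft'
        exact hbd t (by simp) t' (by simp) hStt' x hx y hy'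

-- the enumeration is a bumpA-chain
theorem extE_chain (m n : Int) (k : Nat) : ∀ (b : Int),
    b + k + m ≤ n + 1 →
    List.IsChain (fun p q => bumpA m b p = some q) (extE m n k b) := by
  induction k with
  | zero => intro b _; exact List.isChain_singleton _
  | succ k ih =>
    intro b hb
    have hb' : b + 1 + (k : Int) + m ≤ n + 1 := by push_cast at hb ⊢; omega
    simp only [extE]
    apply isChain_flatMap_blocks (fun p q => bumpA m b p = some q)
      (fun t t' => bumpA m (b+1) t = some t') _ (extE m n k (b+1)) (ih (b+1) hb')
    · -- blocks nonempty
      intro t ht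
      have hge := valid_head_ge m n k (b+1) t hb' (mem_extE_valid m n k (b+1) t ht)
      rw [PySem.List.pyRange_one_cons (by omega)]
      simp
    · -- chain within a block
      intro t ht
      have hv := mem_extE_valid m n k (b+1) t ht
      have hne := valid_ne_nil m n k (b+1) t hv
      obtain ⟨y, rest, rfl⟩ : ∃ y rest, t = y :: rest := by
        cases t with | nil => exact absurd rfl hne | cons y r => exact ⟨y, r, rfl⟩
      rw [List.isChain_map]
      apply (chain_pyRange (b + m) ((y :: rest).headD 0 + 1)).imp
      intro x z hxz
      simp only [List.headD_cons] at hxz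
      simp only [bumpA, if_pos (by omega : x < y)]
      congr 2
      omega
    · -- boundary between consecutive blocks
      intro t ht t' ht' hS x hx y hy
      have hv := mem_extE_valid m n k (b+1) t ht
      have hv' := mem_extE_valid m n k (b+1) t' ht'
      have hge := valid_head_ge m n k (b+1) t hb' hv
      have hge' := valid_head_ge m n k (b+1) t' hb' hv'
      have hne := valid_ne_nil m n k (b+1) t hv
      obtain ⟨y0, rest, rfl⟩ : ∃ y0 rest, t = y0 :: rest := by
        cases t with | nil => exact absurd rfl hne | cons a r => exact ⟨a, r, rfl⟩
      -- last element of block t is (headD t) :: t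
      rw [PySem.List.pyRange_one_succ_right (by simp only [List.headD_cons] at hge ⊢; omega), List.map_append,
        List.map_cons, List.map_nil, List.getLast?_concat, Option.mem_def,
        Option.some.injEq] at hx
      -- head element of block t' is (b+m) :: t'
      rw [PySem.List.pyRange_one_cons (by omega), List.map_cons, List.head?_cons,
        Option.mem_def, Option.some.injEq] at hy
      subst hx; subst hy
      simp only [List.headD_cons]
      simp only [bumpA, if_neg (by omega : ¬ (y0 : Int) < y0), hS]

-- length bound used for the fuel
theorem extE_length (m n : Int) (k : Nat) : ∀ (b : Int), 0 ≤ b → 1 ≤ m →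
    (extE m n k b).length ≤ (n.toNat + 1) ^ k := by
  induction k with
  | zero => intro b _ _; simp [extE]
  | succ k ih =>
    intro b hb hm
    simp only [extE, List.length_flatMap]
    have hbound : ∀ x ∈ (extE m n k (b+1)).map
        (fun t => ((PySem.List.pyRange (b + m) (t.headD 0 + 1) 1).map (fun v => v :: t)).length),
        x ≤ n.toNat + 1 := by
      intro x hx
      rw [List.mem_map] at hx
      obtain ⟨t, ht, rfl⟩ := hx
      have hle := valid_head_le m n k (b+1) t (mem_extE_valid m n k (b+1) t ht)
      rw [List.length_map, PySem.List.length_pyRange_one]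
      omega
    have h1 := List.sum_le_card_nsmul _ _ hbound
    rw [List.length_map, smul_eq_mul] at h1
    have h2 : (extE m n k (b+1)).length * (n.toNat + 1) ≤ (n.toNat + 1) ^ k * (n.toNat + 1) :=
      Nat.mul_le_mul_right _ (ih (b+1) (by omega) hm)
    calc _ ≤ (extE m n k (b+1)).length * (n.toNat + 1) := h1
      _ ≤ (n.toNat + 1) ^ k * (n.toNat + 1) := h2
      _ = (n.toNat + 1) ^ (k + 1) := (pow_succ _ _).symm

-- the while-loop walks down a bumpA-chain
theorem loopA_run (m n : Int) : ∀ (L : List (List Int)) (seq : List Int)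
    (acc : List (List Int)) (fuel : Nat),
    List.IsChain (fun p q => bumpA m 0 p = some q) (seq :: L) →
    (∀ e ∈ seq :: L, (e.headD 0 < n ↔ bumpA m 0 e ≠ none)) →
    bumpA m 0 (L.getLastD seq) = none →
    L.length ≤ fuel →
    loopA m n fuel seq acc = acc ++ L := by
  intro L
  induction L with
  | nil =>
    intro seq acc fuel _ hprop hlast _
    have hstop : ¬ seq.headD 0 < n := by
      intro h
      exact (hprop seq (by simp)).mp h hlast
    cases fuel with
    | zero => simp [loopA]
    | succ f =>
      simp only [loopA]
      rw [if_neg hstop]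
      simp
  | cons q L' ih =>
    intro seq acc fuel hchain hprop hlast hfuel
    have hbump : bumpA m 0 seq = some q := (List.isChain_cons_cons.mp hchain).1
    have hcond : seq.headD 0 < n := by
      apply (hprop seq (by simp)).mpr
      simp [hbump]
    cases fuel with
    | zero => simp at hfuel
    | succ f =>
      simp only [loopA]
      rw [if_pos hcond, hbump]
      change loopA m n f q (acc ++ [q]) = acc ++ q :: L'
      rw [ih q (acc ++ [q]) f (List.isChain_cons_cons.mp hchain).2
        (fun e he => hprop e (List.mem_cons_of_mem _ he))
        (by rw [List.getLastD_cons] at hlast; exact hlast)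
        (by simpa using hfuel)]
      simp

-- A's initial sequence is the minimal configuration
theorem setLastA_cons_of_ne_nil (x v : Int) (l : List Int) (h : l ≠ []) :
    setLastA (x :: l) v = x :: setLastA l v := by
  cases l with
  | nil => exact absurd rfl h
  | cons y rest => rfl

theorem seq0_gen (m n : Int) : ∀ (k : Nat) (b : Int), b + k + 1 = n →
    setLastA ((PySem.List.pyRange b n 1).map (fun i => i + m)) n = minSeq m n k b := by
  intro k
  induction k with
  | zero =>
    intro b hb
    rw [PySem.List.pyRange_one_cons (by omega), PySem.List.pyRange_one_eq_nil (by omega)]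
    simp [setLastA, minSeq]
  | succ k ih =>
    intro b hb
    rw [PySem.List.pyRange_one_cons (by push_cast at hb ⊢; omega), List.map_cons]
    rw [setLastA_cons_of_ne_nil _ _ _ (by
      rw [PySem.List.pyRange_one_cons (by push_cast at hb ⊢; omega)]; simp)]
    rw [ih (b+1) (by push_cast at hb ⊢; omega)]
    rfl

-- B's recursion is the nested enumeration
theorem bSeqs_eq_extE (m n : Int) : ∀ (gap : Nat) (i : Int),
    bSeqs m n gap i = extE m n gap i := by
  intro gap
  induction gap with
  | zero => intro i; rfl
  | succ gap ih => intro i; simp only [bSeqs, extE, ih]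

theorem main_eq (m n : Int) (hn : 1 ≤ n) (hm : 1 ≤ m) (hm2 : m ≤ 2) :
    loopA m n ((n.toNat + 1) ^ (n.toNat + 1))
      (setLastA ((PySem.List.pyRange 0 n 1).map (fun i => i + m)) n)
      [setLastA ((PySem.List.pyRange 0 n 1).map (fun i => i + m)) n]
    = extE m n (n - 1).toNat 0 := by
  have hK : ((n - 1).toNat : Int) = n - 1 := by omega
  have hyp : (0 : Int) + (n - 1).toNat + m ≤ n + 1 := by rw [hK]; omega
  obtain ⟨L, hL⟩ := extE_head m n (n - 1).toNat 0 hyp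
  have hseq0 : setLastA ((PySem.List.pyRange 0 n 1).map (fun i => i + m)) n
      = minSeq m n (n - 1).toNat 0 := seq0_gen m n (n - 1).toNat 0 (by rw [hK]; omega)
  obtain ⟨l', e, hsplit, hhead⟩ := extE_last m n (n - 1).toNat 0 hyp
  have hmeme : e ∈ extE m n (n - 1).toNat 0 := by rw [hsplit]; simp
  have hve := mem_extE_valid m n (n - 1).toNat 0 e hmeme
  have hbnone : bumpA m 0 e = none :=
    (valid_bump_none_iff m n (n - 1).toNat 0 e hve).mpr hhead
  have hlastD : L.getLastD (minSeq m n (n - 1).toNat 0) = e := by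
    have h1 : (minSeq m n (n - 1).toNat 0 :: L).getLastD [] = e := by
      rw [← hL, hsplit]
      rw [List.getLastD_eq_getLast?, List.getLast?_concat]
      rfl
    rwa [List.getLastD_cons] at h1
  have hprop : ∀ e' ∈ extE m n (n - 1).toNat 0,
      (e'.headD 0 < n ↔ bumpA m 0 e' ≠ none) := by
    intro e' he'
    have hv' := mem_extE_valid m n (n - 1).toNat 0 e' he'
    have hle' := valid_head_le m n (n - 1).toNat 0 e' hv'
    have hiff := valid_bump_none_iff m n (n - 1).toNat 0 e' hv'
    constructor
    · intro h hcon
      have := hiff.mp hcon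
      omega
    · intro h
      by_contra hcon
      have hle2 : n ≤ e'.headD 0 := by omega
      exact h (hiff.mpr (by omega))
  have hlen : L.length ≤ (n.toNat + 1) ^ (n.toNat + 1) := by
    have h1 := extE_length m n (n - 1).toNat 0 (by omega) hm
    rw [hL] at h1
    have h2 : (n.toNat + 1) ^ (n - 1).toNat ≤ (n.toNat + 1) ^ (n.toNat + 1) :=
      Nat.pow_le_pow_right (by omega) (by omega)
    simp only [List.length_cons] at h1
    omega
  rw [hseq0]
  rw [loopA_run m n L (minSeq m n (n - 1).toNat 0) _ _
    (by rw [← hL]; exact extE_chain m n (n - 1).toNat 0 hyp)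
    (by rw [← hL]; exact hprop)
    (by rw [hlastD]; exact hbnone) hlen]
  rw [hL]
  rfl

-- ===== VERDICT (by name: the statement is the Claim_ definition above) =====
theorem generate_UIO_spec : Claim_equal_generate_UIO := by
  intro n connected _ hpre
  have hn : (1 : Int) ≤ n := hpre
  unfold Spec_generate_UIO generate_UIO generate_UIO_alt
  cases connected <;> simp only [Bool.false_eq_true, if_true, if_false] <;>
    rw [bSeqs_eq_extE] <;> exact main_eq _ n hn (by omega) (by omega)
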